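-- pv_equiv track=rewrite | github.com/tomdif/causal-algebraic-geometry-lean | scripts/gap_d3_prefix_sum.py | enum_noninc
-- ===== SOURCE A (Python) =====
-- def enum_noninc(m):
--     result = []
--     def gen(prefix, max_val, remaining):
--         if remaining == 0:
--             result.append(tuple(prefix)); return
--         for v in range(max_val + 1):
--             gen(prefix + [v], v, remaining - 1)
--     for first in range(m):
--         gen([first], first, m - 1)
--     return result
-- ===== SOURCE B (Python) =====
-- def enum_noninc(m):
--     seqs = [[f] for f in range(m)]
--     for _ in range(m - 1):
--         seqs = [s + [v] for s in seqs for v in range(s[-1] + 1)]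
--     return [tuple(s) for s in seqs]
-- ===== Notes on version B (the rewrite author's own statement) =====
-- stated objective: alternative
-- what changed: Replaces the per-prefix recursive DFS generator with an iterative breadth-first expansion: start from the length-1 prefixes and m-1 times extend every sequence by each admissible next value via a comprehension; both produce the lexicographically ascending list.
import Mathlib
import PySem

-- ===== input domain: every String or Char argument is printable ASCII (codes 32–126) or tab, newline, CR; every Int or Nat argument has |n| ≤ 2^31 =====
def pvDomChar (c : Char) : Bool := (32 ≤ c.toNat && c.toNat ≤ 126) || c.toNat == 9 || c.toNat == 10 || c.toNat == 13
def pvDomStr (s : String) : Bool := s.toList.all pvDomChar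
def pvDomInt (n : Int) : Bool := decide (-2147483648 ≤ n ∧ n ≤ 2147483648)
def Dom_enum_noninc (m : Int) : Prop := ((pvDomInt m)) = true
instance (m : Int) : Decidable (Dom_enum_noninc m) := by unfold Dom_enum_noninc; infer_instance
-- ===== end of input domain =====

-- B replaces A's recursive DFS with an iterative level-by-level expansion of all sequences at once (objective: alternative).

-- ===== PORT A =====
-- 'remaining' is always m-1 ≥ 0 on every call A makes, so it is carried as Nat fuel.
def genA (pfx : List Int) (maxVal : Int) : Nat → List (List Int)
  | 0 => [pfx]
  | n+1 => (PySem.List.pyRange 0 (maxVal + 1) 1).foldl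
      (fun acc v => acc ++ genA (pfx ++ [v]) v n) []

def enum_noninc (m : Int) : List (List Int) :=
  (PySem.List.pyRange 0 m 1).foldl (fun acc first => acc ++ genA [first] first (m - 1).toNat) []

-- ===== PORT B =====
-- s[-1]: every s in seqs is nonempty, so pyGetD with default 0 is exact.
def enum_noninc_alt (m : Int) : List (List Int) :=
  (PySem.List.pyRange 0 (m - 1) 1).foldl
    (fun seqs _ => seqs.flatMap
      (fun s => (PySem.List.pyRange 0 (PySem.List.pyGetD s (-1) 0 + 1) 1).map (fun v => s ++ [v])))
    ((PySem.List.pyRange 0 m 1).map (fun f => [f]))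

-- ===== PRECONDITION & SPEC =====
-- Pre_ excludes only m beyond CPython's recursion capacity: A's helper gen recurses to depth m, so for
-- excluded m Python A raises RecursionError (the bound keeps a small margin for the caller's stack depth);
-- A returns no value on any excluded input.
def Pre_enum_noninc (m : Int) : Prop := m ≤ 990
instance (m : Int) : Decidable (Pre_enum_noninc m) := by unfold Pre_enum_noninc; infer_instance
def pvWitness_enum_noninc : Int := (3)

def Spec_enum_noninc (m : Int) (out : List (List Int)) : Prop := out = enum_noninc_alt m
instance (m : Int) (out : List (List Int)) : Decidable (Spec_enum_noninc m out) := by unfold Spec_enum_noninc; infer_instance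

-- ===== CLAIM (what is proved, stated in full; the proofs are below) =====
def Claim_equal_enum_noninc : Prop := ∀ (m : Int), Dom_enum_noninc m → Pre_enum_noninc m → Spec_enum_noninc m (enum_noninc m)

-- ===== LEMMAS AND PROOFS =====

-- B's one level of expansion, as used in enum_noninc_alt.
def stepL (ss : List (List Int)) : List (List Int) :=
  ss.flatMap (fun s => (PySem.List.pyRange 0 (PySem.List.pyGetD s (-1) 0 + 1) 1).map (fun v => s ++ [v]))

lemma foldl_const_iterate {α β : Type} (l : List α) (f : β → β) (x : β) :
    l.foldl (fun b _ => f b) x = f^[l.length] x := by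
  induction l generalizing x with
  | nil => rfl
  | cons a l ih => simp [List.foldl_cons, ih, Function.iterate_succ_apply]

lemma stepL_flatMap {α : Type} (xs : List α) (g : α → List (List Int)) :
    stepL (xs.flatMap g) = xs.flatMap (fun x => stepL (g x)) := by
  induction xs with
  | nil => rfl
  | cons a xs ih => simp [stepL, List.flatMap_append] at *; simp [ih]

lemma iterate_stepL_flatMap {α : Type} (n : Nat) (xs : List α) (g : α → List (List Int)) :
    stepL^[n] (xs.flatMap g) = xs.flatMap (fun x => stepL^[n] (g x)) := by
  induction n generalizing g with
  | zero => rfl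
  | succ n ih => simp [Function.iterate_succ_apply, stepL_flatMap, ih]

lemma stepL_singleton (pfx : List Int) :
    stepL [pfx] = (PySem.List.pyRange 0 (PySem.List.pyGetD pfx (-1) 0 + 1) 1).map (fun v => pfx ++ [v]) := by
  simp [stepL]

lemma genA_eq (n : Nat) : ∀ (pfx : List Int) (v : Int),
    PySem.List.pyGetD pfx (-1) 0 = v → genA pfx v n = stepL^[n] [pfx] := by
  induction n with
  | zero => intro pfx v _; rfl
  | succ n ih =>
    intro pfx v hv
    rw [genA, PySem.List.foldl_append_eq_flatMap, List.nil_append]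
    have h1 : (PySem.List.pyRange 0 (v + 1) 1).flatMap (fun w => genA (pfx ++ [w]) w n)
        = (PySem.List.pyRange 0 (v + 1) 1).flatMap (fun w => stepL^[n] [pfx ++ [w]]) := by
      apply List.flatMap_congr
      intro w _
      exact ih (pfx ++ [w]) w (PySem.List.pyGetD_neg_one_append_singleton pfx w 0)
    rw [h1]
    have h2 : (PySem.List.pyRange 0 (v + 1) 1).flatMap (fun w => stepL^[n] [pfx ++ [w]])
        = stepL^[n] ((PySem.List.pyRange 0 (v + 1) 1).flatMap (fun w => [pfx ++ [w]])) := by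
      rw [iterate_stepL_flatMap]
    rw [h2]
    have h3 : (PySem.List.pyRange 0 (v + 1) 1).flatMap (fun w => [pfx ++ [w]])
        = stepL [pfx] := by
      rw [stepL_singleton, hv, ← List.map_eq_flatMap]
    rw [h3, ← Function.iterate_succ_apply]

-- ===== VERDICT (by name: the statement is the Claim_ definition above) =====
theorem enum_noninc_spec : Claim_equal_enum_noninc := by
  intro m _ _
  unfold Spec_enum_noninc enum_noninc enum_noninc_alt
  rw [PySem.List.foldl_append_eq_flatMap, List.nil_append]
  have hA : (PySem.List.pyRange 0 m 1).flatMap (fun f => genA [f] f (m - 1).toNat)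
      = (PySem.List.pyRange 0 m 1).flatMap (fun f => stepL^[(m - 1).toNat] [[f]]) := by
    apply List.flatMap_congr
    intro f _
    exact genA_eq (m - 1).toNat [f] f (by simp [PySem.List.pyGetD_neg_one])
  rw [hA, ← iterate_stepL_flatMap]
  have hlen : (PySem.List.pyRange 0 (m - 1) 1).length = (m - 1).toNat := by
    simp [PySem.List.length_pyRange_one]
  rw [show (fun (seqs : List (List Int)) (_ : Int) => seqs.flatMap
      (fun s => (PySem.List.pyRange 0 (PySem.List.pyGetD s (-1) 0 + 1) 1).map (fun v => s ++ [v])))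
      = (fun seqs _ => stepL seqs) from rfl]
  rw [foldl_const_iterate, hlen]
  congr 1
  rw [← List.map_eq_flatMap]
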